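-- pv_equiv track=rewrite | github.com/thomaswynnem/MIT-6006-Problem-Sets | set0problem06.py | count_long_subarrays
-- ===== SOURCE A (Python) =====
-- def count_long_subarrays(A):
--     longestIncStrk=[]
--     incstrk=1
--     lenArray=len(A)
--     if lenArray == 1:
--         return 1
--     else:
--         for elem in range(lenArray-1):
--             if A[elem]<A[elem+1]:
--                 incstrk+=1
--             else:
--                 longestIncStrk.append(incstrk)
--                 incstrk=1
--         longestIncStrk.append(incstrk)
--     return longestIncStrk.count(max(longestIncStrk))
-- ===== SOURCE B (Python) =====
-- def count_long_subarrays(A):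
--     cur, best, best_count = 1, 0, 0
--     for prev, nxt in zip(A, A[1:]):
--         if prev < nxt:
--             cur += 1
--         else:
--             if cur > best:
--                 best, best_count = cur, 1
--             elif cur == best:
--                 best_count += 1
--             cur = 1
--     if cur > best:
--         return 1
--     if cur == best:
--         return best_count + 1
--     return best_count
-- ===== Notes on version B (the rewrite author's own statement) =====
-- stated objective: simpler
-- what changed: B replaces A's build-a-list-of-run-lengths-then-max-then-count pipeline (three passes and an intermediate list) with a single incremental pass maintaining current run length, best length and best count, closing the final run after the loop; the len==1 special case disappears.
import Mathlib
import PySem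

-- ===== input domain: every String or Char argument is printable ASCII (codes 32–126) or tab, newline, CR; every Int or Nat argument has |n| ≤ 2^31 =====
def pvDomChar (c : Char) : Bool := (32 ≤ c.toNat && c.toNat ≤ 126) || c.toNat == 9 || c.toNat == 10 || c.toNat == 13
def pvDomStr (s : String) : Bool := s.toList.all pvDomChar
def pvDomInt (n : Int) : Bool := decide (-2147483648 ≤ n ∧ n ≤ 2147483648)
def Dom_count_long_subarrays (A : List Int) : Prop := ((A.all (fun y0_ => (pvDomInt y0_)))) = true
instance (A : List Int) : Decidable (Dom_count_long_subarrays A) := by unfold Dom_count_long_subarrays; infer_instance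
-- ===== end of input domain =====

-- B does one incremental pass (cur/best/best_count, O(1) space) instead of A's
-- run-length list followed by max and count; return values are proved equal.

-- ===== PORT A =====
def count_long_subarrays (A : List Int) : Int :=
  let longestIncStrk : List Int := []
  let incstrk : Int := 1
  let lenArray : Int := A.length
  if lenArray = 1 then 1
  else
    let st := (PySem.List.pyRange 0 (lenArray - 1) 1).foldl
      (fun (st : List Int × Int) elem =>
        if PySem.List.pyGetD A elem 0 < PySem.List.pyGetD A (elem + 1) 0 then
          (st.1, st.2 + 1)                      -- incstrk += 1
        else
          (st.1 ++ [st.2], 1))                  -- append, reset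
      (longestIncStrk, incstrk)
    let runs := st.1 ++ [st.2]                  -- final append
    -- max(runs): runs always ends in the final append, so it is nonempty and Python's max returns
    ((runs.count ((PySem.List.max? runs (fun y => y)).getD 0) : Int))

-- ===== PORT B =====
def count_long_subarrays_alt (A : List Int) : Int :=
  -- zip(A, A[1:]); A[1:] = A.drop 1 (PySem.List.slice_from_natCast)
  let st := (A.zip (A.drop 1)).foldl
    (fun (st : Int × Int × Int) (p : Int × Int) =>
      if p.1 < p.2 then (st.1 + 1, st.2.1, st.2.2)
      else if st.2.1 < st.1 then (1, st.1, 1)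
      else if st.1 = st.2.1 then (1, st.2.1, st.2.2 + 1)
      else (1, st.2.1, st.2.2))
    (1, 0, 0)
  if st.2.1 < st.1 then 1
  else if st.1 = st.2.1 then st.2.2 + 1
  else st.2.2

-- ===== PRECONDITION & SPEC =====
def Spec_count_long_subarrays (A : List Int) (out : Int) : Prop := out = count_long_subarrays_alt A
instance (A : List Int) (out : Int) : Decidable (Spec_count_long_subarrays A out) := by unfold Spec_count_long_subarrays; infer_instance

-- ===== CLAIM (what is proved, stated in full; the proofs are below) =====
def Claim_equal_count_long_subarrays : Prop := ∀ (A : List Int), Dom_count_long_subarrays A → Spec_count_long_subarrays A (count_long_subarrays A)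

-- ===== LEMMAS AND PROOFS =====

-- A[k], A[k+1] with a Nat k cast to Int: bridge the +1 through the cast
theorem pyGetD_natCast_succ (xs : List Int) (k : Nat) (d : Int) :
    PySem.List.pyGetD xs ((k : Int) + 1) d = xs.getD (k + 1) d := by
  rw [← Nat.cast_add_one, PySem.List.pyGetD_natCast]

-- index loop over range(len-1) reading adjacent entries = fold over the zip of adjacent pairs
theorem foldl_range_adjacent {σ : Type} (f : σ → Int → Int → σ) :
    ∀ (ys : List Int) (x : Int) (init : σ),
      (List.range ys.length).foldl
        (fun st k => f st ((x :: ys).getD k 0) ((x :: ys).getD (k + 1) 0)) init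
      = ((x :: ys).zip ys).foldl (fun st p => f st p.1 p.2) init := by
  intro ys
  induction ys with
  | nil => intro x init; simp
  | cons y t ih =>
    intro x init
    rw [List.length_cons, List.range_succ_eq_map]
    simp only [List.foldl_cons, List.foldl_map, List.getD_cons_zero, List.getD_cons_succ,
      List.zip_cons_cons]
    exact ih y (f init x y)

theorem foldl_max_append (acc : List Int) (cur : Int) :
    (acc ++ [cur]).foldl max 0 = max (acc.foldl max 0) cur := by
  simp [List.foldl_append]

theorem close_max (acc : List Int) (cur best : Int) (hb : best = acc.foldl max 0) :
    (acc ++ [cur]).foldl max 0 = if best < cur then cur else best := by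
  rw [foldl_max_append, ← hb]
  split_ifs with h
  · exact max_eq_right h.le
  · exact max_eq_left (not_lt.mp h)

theorem close_count (acc : List Int) (cur best cnt : Int)
    (hb : best = acc.foldl max 0)
    (hcnt : cnt = (acc.count best : Int)) :
    ((acc ++ [cur]).count (if best < cur then cur else best) : Int)
      = if best < cur then 1 else if cur = best then cnt + 1 else cnt := by
  have hle : ∀ y ∈ acc, y ≤ acc.foldl max 0 := (PySem.List.le_foldl_max acc 0).2
  split_ifs with h h2
  · -- new maximum: cur does not occur in acc
    have hz : acc.count cur = 0 := by
      rw [List.count_eq_zero]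
      intro hmem
      have := hle cur hmem
      omega
    simp [List.count_append, hz]
  · -- tie
    subst h2
    simp [List.count_append, hcnt]
  · -- shorter run: cur ≠ best
    simp [List.count_append, hcnt, List.count_singleton]
    omega

theorem max?_getD_eq_foldl (l : List Int) (hne : l ≠ []) (hpos : ∀ r ∈ l, 1 ≤ r) :
    (PySem.List.max? l (fun y => y)).getD 0 = l.foldl max 0 := by
  cases l with
  | nil => exact absurd rfl hne
  | cons x t =>
    rw [PySem.List.max?_id_cons]
    have hx : 1 ≤ x := hpos x (by simp)
    have : max 0 x = x := max_eq_right (by omega)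
    simp [List.foldl_cons, this]

theorem count_append_max (acc : List Int) (cur best cnt : Int)
    (h1 : ∀ r ∈ acc, 1 ≤ r) (hc : 1 ≤ cur) (hb : best = acc.foldl max 0)
    (hcnt : cnt = (acc.count best : Int)) :
    ((acc ++ [cur]).count ((PySem.List.max? (acc ++ [cur]) (fun y => y)).getD 0) : Int)
      = if best < cur then 1 else if cur = best then cnt + 1 else cnt := by
  have hpos : ∀ r ∈ acc ++ [cur], 1 ≤ r := by
    intro r hr
    rcases List.mem_append.mp hr with h | h
    · exact h1 r h
    · simp at h; omega
  rw [max?_getD_eq_foldl _ (by simp) hpos, close_max acc cur best hb]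
  exact close_count acc cur best cnt hb hcnt

theorem main_inv (P : List (Int × Int)) :
    ∀ (acc : List Int) (cur best cnt : Int),
      (∀ r ∈ acc, 1 ≤ r) → 1 ≤ cur → best = acc.foldl max 0 → cnt = (acc.count best : Int) →
      (let stA := P.foldl
          (fun (st : List Int × Int) (p : Int × Int) =>
            if p.1 < p.2 then (st.1, st.2 + 1) else (st.1 ++ [st.2], 1)) (acc, cur)
       let stB := P.foldl
          (fun (st : Int × Int × Int) (p : Int × Int) =>
            if p.1 < p.2 then (st.1 + 1, st.2.1, st.2.2)
            else if st.2.1 < st.1 then (1, st.1, 1)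
            else if st.1 = st.2.1 then (1, st.2.1, st.2.2 + 1)
            else (1, st.2.1, st.2.2)) (cur, best, cnt)
       (((stA.1 ++ [stA.2]).count ((PySem.List.max? (stA.1 ++ [stA.2]) (fun y => y)).getD 0) : Int))
         = if stB.2.1 < stB.1 then 1 else if stB.1 = stB.2.1 then stB.2.2 + 1 else stB.2.2) := by
  induction P with
  | nil =>
    intro acc cur best cnt h1 hc hb hcnt
    simpa using count_append_max acc cur best cnt h1 hc hb hcnt
  | cons p P ih =>
    intro acc cur best cnt h1 hc hb hcnt
    simp only [List.foldl_cons]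
    by_cases hp : p.1 < p.2
    · simp only [if_pos hp]
      exact ih acc (cur + 1) best cnt h1 (by omega) hb hcnt
    · simp only [if_neg hp]
      have h1' : ∀ r ∈ acc ++ [cur], 1 ≤ r := by
        intro r hr
        rcases List.mem_append.mp hr with h | h
        · exact h1 r h
        · simp at h; omega
      have hmax := close_max acc cur best hb
      have hcount := close_count acc cur best cnt hb hcnt
      by_cases hgt : best < cur
      · simp only [if_pos hgt] at hmax hcount ⊢
        exact ih (acc ++ [cur]) 1 cur 1 h1' le_rfl hmax.symm (by rw [hcount])
      · simp only [if_neg hgt] at hmax hcount ⊢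
        by_cases heq : cur = best
        · simp only [if_pos heq] at hcount ⊢
          exact ih (acc ++ [cur]) 1 best (cnt + 1) h1' le_rfl hmax.symm (by rw [hcount])
        · simp only [if_neg heq] at hcount ⊢
          exact ih (acc ++ [cur]) 1 best cnt h1' le_rfl hmax.symm (by rw [hcount])

-- ===== VERDICT (by name: the statement is the Claim_ definition above) =====
theorem count_long_subarrays_spec : Claim_equal_count_long_subarrays := by
  intro A _
  unfold Spec_count_long_subarrays count_long_subarrays count_long_subarrays_alt
  cases A with
  | nil => decide
  | cons x ys =>
    cases ys with
    | nil => simp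
    | cons y t =>
      have hlen : ((x :: y :: t).length : Int) ≠ 1 := by simp; omega
      simp only [if_neg hlen]
      have hrange : PySem.List.pyRange 0 (((x :: y :: t).length : Int) - 1) 1
          = (List.range (y :: t).length).map (fun k : Nat => (k : Int)) := by
        rw [PySem.List.pyRange_one]
        have h2 : ((((x :: y :: t).length : Int) - 1) - 0).toNat = (y :: t).length := by
          simp
        rw [h2]
        simp only [zero_add]
      rw [hrange, List.foldl_map]
      simp only [PySem.List.pyGetD_natCast, pyGetD_natCast_succ]
      rw [foldl_range_adjacent
            (fun st a b => if a < b then (st.1, st.2 + 1) else (st.1 ++ [st.2], 1))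
            (y :: t) x ([], 1)]
      rw [show (x :: y :: t).drop 1 = y :: t from rfl]
      exact main_inv ((x :: y :: t).zip (y :: t)) [] 1 0 0 (by simp) le_rfl (by simp) (by simp)
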